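-- pv_equiv track=rewrite | github.com/jin-ryu/Algorithm-Team-Notes | Algorithm/그리디/만들수없는금액.py | solution
-- ===== SOURCE A (Python) =====
-- from itertools import combinations
--
-- def solution(N, coin_types):
--     combination = set()
--
--     # 동전으로 만들 수 있는 값을 계산
--     for r in range(1, len(coin_types)+1):
--         combination.update(map(sum, combinations(coin_types, r)))
--
--     coin = 0
--     while True:
--         coin += 1
--         if coin not in combination:
--             return coin
--
--     return 0
-- ===== SOURCE B (Python) =====
-- def solution(N, coin_types):
--     # reachable subset sums via one-pass set DP (deduplicated each step),
--     # then scan the sorted distinct positive sums for the first gap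
--     sums = {0}
--     for c in coin_types:
--         sums |= {s + c for s in sums}
--     expected = 1
--     for s in sorted(x for x in sums if x >= 1):
--         if s == expected:
--             expected += 1
--         elif s > expected:
--             break
--     return expected
-- ===== Notes on version B (the rewrite author's own statement) =====
-- stated objective: faster
-- what changed: B replaces A's enumeration of all r-combinations for every r (2^N subset sums recomputed with duplicates) plus an unbounded upward membership scan by a one-pass deduplicated subset-sum set DP followed by a single sorted scan over the distinct positive sums that stops at the first gap.
import Mathlib
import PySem

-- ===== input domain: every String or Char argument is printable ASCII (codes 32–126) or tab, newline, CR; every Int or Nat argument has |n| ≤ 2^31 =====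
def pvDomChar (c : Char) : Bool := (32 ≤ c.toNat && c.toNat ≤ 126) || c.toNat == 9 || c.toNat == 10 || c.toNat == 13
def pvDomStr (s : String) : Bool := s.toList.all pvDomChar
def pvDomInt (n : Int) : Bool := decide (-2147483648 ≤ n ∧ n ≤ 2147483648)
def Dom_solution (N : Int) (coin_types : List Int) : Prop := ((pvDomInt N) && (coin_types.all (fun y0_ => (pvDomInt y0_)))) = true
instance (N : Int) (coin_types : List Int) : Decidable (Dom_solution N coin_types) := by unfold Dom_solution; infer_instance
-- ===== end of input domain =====

-- B replaces A's per-r combination enumeration and unbounded upward membership scan by a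
-- one-pass deduplicated subset-sum set DP plus a single sorted scan for the first gap.

-- termination helper for A's 'while True: coin += 1; if coin not in s: return coin' loop
theorem pvCountGE_lt (s : List Int) (c : Int) (h : c ∈ s) :
    s.countP (fun x => decide (c + 1 ≤ x)) < s.countP (fun x => decide (c ≤ x)) := by
  induction s with
  | nil => cases h
  | cons a t ih =>
    have hmono : t.countP (fun x => decide (c + 1 ≤ x)) ≤ t.countP (fun x => decide (c ≤ x)) := by
      apply List.countP_mono_left
      intro x _ hx
      simp only [decide_eq_true_eq] at hx ⊢
      omega
    rcases List.mem_cons.mp h with rfl | ha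
    · have e1 : (decide (c + 1 ≤ c)) = false := by simp
      have e2 : (decide (c ≤ c)) = true := by simp
      simp only [List.countP_cons, e1, e2]
      simp only [Bool.false_eq_true, if_false, if_true]
      omega
    · have hlt := ih ha
      simp only [List.countP_cons]
      by_cases h1 : c + 1 ≤ a
      · have h2 : c ≤ a := by omega
        simp only [decide_eq_true h1, decide_eq_true h2, if_true]
        omega
      · by_cases h2 : c ≤ a
        · simp only [decide_eq_false h1, decide_eq_true h2]
          simp only [Bool.false_eq_true, if_false, if_true]
          omega
        · simp only [decide_eq_false h1, decide_eq_false h2]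
          simp only [Bool.false_eq_true, if_false]
          omega

-- A's search loop: while True: coin += 1; if coin not in combination: return coin
def pvFindAbsent (s : List Int) (coin : Int) : Int :=
  if coin ∈ s then pvFindAbsent s (coin + 1) else coin
termination_by s.countP (fun x => decide (coin ≤ x))
decreasing_by exact pvCountGE_lt s coin (by assumption)

-- ===== PORT A =====
def solution (N : Int) (coin_types : List Int) : Int :=
  -- combination = set(); for r in range(1, len(coin_types)+1): combination.update(map(sum, combinations(coin_types, r)))
  let combination : PySem.Set Int :=
    (PySem.List.pyRange 1 ((coin_types.length : Int) + 1) 1).foldl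
      (fun s r => PySem.Set.update s ((PySem.List.combinations coin_types r.toNat).map List.sum))
      PySem.Set.empty
  pvFindAbsent combination 1

-- ===== PORT B =====
-- B's gap scan: expected = 1; for s in <sorted list>: if s == expected: expected += 1
--               elif s > expected: break;  return expected
def pvScanGap : List Int → Int → Int
  | [], e => e
  | s :: rest, e =>
    if s = e then pvScanGap rest (e + 1)
    else if e < s then e
    else pvScanGap rest e

def solution_alt (N : Int) (coin_types : List Int) : Int :=
  -- sums = {0}; for c in coin_types: sums |= {s + c for s in sums}
  let sums : PySem.Set Int :=
    coin_types.foldl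
      (fun S c => PySem.Set.union S (PySem.Set.ofList (S.map (· + c))))
      (PySem.Set.ofList [0])
  -- for s in sorted(x for x in sums if x >= 1): …
  pvScanGap (PySem.List.sorted (sums.filter (fun x => decide (1 ≤ x))) (fun x => x) false) 1

-- ===== PRECONDITION & SPEC =====
def Spec_solution (N : Int) (coin_types : List Int) (out : Int) : Prop := out = solution_alt N coin_types
instance (N : Int) (coin_types : List Int) (out : Int) : Decidable (Spec_solution N coin_types out) := by unfold Spec_solution; infer_instance

-- ===== CLAIM (what is proved, stated in full; the proofs are below) =====
def Claim_equal_solution : Prop := ∀ (N : Int) (coin_types : List Int), Dom_solution N coin_types → Spec_solution N coin_types (solution N coin_types)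

-- ===== LEMMAS AND PROOFS =====

-- pvFindAbsent returns the least value ≥ c absent from s
theorem pvFindAbsent_spec :
    ∀ (n : Nat) (s : List Int) (c : Int),
      s.countP (fun x => decide (c ≤ x)) ≤ n →
      pvFindAbsent s c ∉ s ∧ c ≤ pvFindAbsent s c ∧
        ∀ x, c ≤ x → x < pvFindAbsent s c → x ∈ s := by
  intro n
  induction n with
  | zero =>
    intro s c hn
    have hcs : c ∉ s := by
      intro hc
      have := pvCountGE_lt s c hc
      omega
    rw [pvFindAbsent.eq_def, if_neg hcs]
    exact ⟨hcs, le_rfl, fun x hx1 hx2 => absurd (lt_of_le_of_lt hx1 hx2) (lt_irrefl c)⟩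
  | succ n ih =>
    intro s c hn
    by_cases hcs : c ∈ s
    · rw [pvFindAbsent.eq_def, if_pos hcs]
      have hcnt := pvCountGE_lt s c hcs
      obtain ⟨h1, h2, h3⟩ := ih s (c + 1) (by omega)
      refine ⟨h1, by omega, ?_⟩
      intro x hx1 hx2
      by_cases hxc : x = c
      · exact hxc ▸ hcs
      · exact h3 x (by omega) hx2
    · rw [pvFindAbsent.eq_def, if_neg hcs]
      exact ⟨hcs, le_rfl, fun x hx1 hx2 => absurd (lt_of_le_of_lt hx1 hx2) (lt_irrefl c)⟩

-- pvScanGap on a strictly increasing list of values ≥ e returns the least value ≥ e absent from it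
theorem pvScanGap_spec :
    ∀ (l : List Int) (e : Int), l.Pairwise (· < ·) → (∀ x ∈ l, e ≤ x) →
      pvScanGap l e ∉ l ∧ e ≤ pvScanGap l e ∧
        ∀ x, e ≤ x → x < pvScanGap l e → x ∈ l := by
  intro l
  induction l with
  | nil =>
    intro e _ _
    exact ⟨List.not_mem_nil, le_rfl, fun x hx1 hx2 => absurd (lt_of_le_of_lt hx1 hx2) (lt_irrefl e)⟩
  | cons s rest ih =>
    intro e hp hge
    have hrest_gt : ∀ x ∈ rest, s < x := (List.pairwise_cons.mp hp).1
    have hp' : rest.Pairwise (· < ·) := (List.pairwise_cons.mp hp).2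
    have hse : e ≤ s := hge s List.mem_cons_self
    unfold pvScanGap
    by_cases h1 : s = e
    · subst h1
      rw [if_pos rfl]
      obtain ⟨g1, g2, g3⟩ := ih (s + 1) hp' (fun x hx => by have := hrest_gt x hx; omega)
      refine ⟨?_, by omega, ?_⟩
      · intro hmem
        rcases List.mem_cons.mp hmem with heq | hmem'
        · omega
        · exact g1 hmem'
      · intro x hx1 hx2
        by_cases hxs : x = s
        · exact hxs ▸ List.mem_cons_self
        · exact List.mem_cons_of_mem _ (g3 x (by omega) hx2)
    · rw [if_neg h1]
      have hlt : e < s := lt_of_le_of_ne hse (fun h => h1 h.symm)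
      rw [if_pos hlt]
      refine ⟨?_, le_rfl, fun x hx1 hx2 => absurd (lt_of_le_of_lt hx1 hx2) (lt_irrefl e)⟩
      intro hmem
      rcases List.mem_cons.mp hmem with heq | hmem'
      · omega
      · have := hrest_gt e hmem'; omega

-- membership in A's fold of set.update calls
theorem pvMemFoldUpdate (f : Int → List Int) :
    ∀ (rs : List Int) (s : PySem.Set Int) (x : Int),
      x ∈ rs.foldl (fun s r => PySem.Set.update s (f r)) s ↔ x ∈ s ∨ ∃ r ∈ rs, x ∈ f r := by
  intro rs
  induction rs with
  | nil => simp
  | cons r rs ih =>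
    intro s x
    simp only [List.foldl_cons, ih, PySem.Set.mem_update, List.mem_cons]
    constructor
    · rintro ((hs | hf) | ⟨r', hr', hx⟩)
      · exact Or.inl hs
      · exact Or.inr ⟨r, Or.inl rfl, hf⟩
      · exact Or.inr ⟨r', Or.inr hr', hx⟩
    · rintro (hs | ⟨r', (rfl | hr'), hx⟩)
      · exact Or.inl (Or.inl hs)
      · exact Or.inl (Or.inr hx)
      · exact Or.inr ⟨r', hr', hx⟩

-- A's set contains exactly the sums of the nonempty sublists of coin_types
theorem pvMemA (coin_types : List Int) (x : Int) :
    (x ∈ (PySem.List.pyRange 1 ((coin_types.length : Int) + 1) 1).foldl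
      (fun s r => PySem.Set.update s ((PySem.List.combinations coin_types r.toNat).map List.sum))
      PySem.Set.empty)
    ↔ ∃ l, l.Sublist coin_types ∧ l ≠ [] ∧ l.sum = x := by
  rw [pvMemFoldUpdate]
  simp only [PySem.Set.empty, List.not_mem_nil, false_or, List.mem_map,
    PySem.List.mem_combinations_iff, PySem.List.mem_pyRange_one]
  constructor
  · rintro ⟨r, ⟨hr1, hr2⟩, l, ⟨hsub, hlen⟩, hsum⟩
    refine ⟨l, hsub, ?_, hsum⟩
    intro hnil
    subst hnil
    simp at hlen
    omega
  · rintro ⟨l, hsub, hne, hsum⟩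
    refine ⟨(l.length : Int), ⟨?_, ?_⟩, l, ⟨hsub, ?_⟩, hsum⟩
    · have : l.length ≠ 0 := fun h => hne (List.length_eq_zero_iff.mp h)
      omega
    · have := hsub.length_le
      omega
    · simp

-- membership in B's subset-sum fold
theorem pvMemB :
    ∀ (coins : List Int) (S : PySem.Set Int) (x : Int),
      x ∈ coins.foldl (fun S c => PySem.Set.union S (PySem.Set.ofList (S.map (· + c)))) S
      ↔ ∃ s ∈ S, ∃ l : List Int, l.Sublist coins ∧ s + l.sum = x := by
  intro coins
  induction coins with
  | nil =>
    intro S x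
    simp only [List.foldl_nil]
    constructor
    · intro hx; exact ⟨x, hx, [], List.nil_sublist _, by simp⟩
    · rintro ⟨s, hs, l, hl, hsum⟩
      have hnil : l = [] := List.sublist_nil.mp hl
      subst hnil
      have : s = x := by simpa using hsum
      subst this
      exact hs
  | cons c cs ih =>
    intro S x
    simp only [List.foldl_cons, ih, PySem.Set.mem_union, PySem.Set.mem_ofList, List.mem_map]
    constructor
    · rintro ⟨s, (hs | ⟨s0, hs0, rfl⟩), l, hsub, hsum⟩
      · exact ⟨s, hs, l, hsub.cons c, hsum⟩
      · exact ⟨s0, hs0, c :: l, (List.sublist_cons_iff).mpr (Or.inr ⟨l, rfl, hsub⟩), by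
          simp only [List.sum_cons]; omega⟩
    · rintro ⟨s, hs, l, hsub, hsum⟩
      rcases (List.sublist_cons_iff).mp hsub with hl | ⟨l', rfl, hl'⟩
      · exact ⟨s, Or.inl hs, l, hl, hsum⟩
      · refine ⟨s + c, Or.inr ⟨s, hs, rfl⟩, l', hl', ?_⟩
        simp only [List.sum_cons] at hsum
        omega

-- B's fold keeps the set duplicate-free
theorem pvNodupB :
    ∀ (coins : List Int) (S : PySem.Set Int), S.Nodup →
      (coins.foldl (fun S c => PySem.Set.union S (PySem.Set.ofList (S.map (· + c)))) S).Nodup := by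
  intro coins
  induction coins with
  | nil => intro S h; exact h
  | cons c cs ih =>
    intro S h
    simp only [List.foldl_cons]
    exact ih _ (PySem.Set.nodup_union _ _ h)

-- ===== VERDICT (by name: the statement is the Claim_ definition above) =====
theorem solution_spec : Claim_equal_solution := by
  intro N coin_types _
  unfold Spec_solution solution solution_alt
  set sums : PySem.Set Int :=
    coin_types.foldl (fun S c => PySem.Set.union S (PySem.Set.ofList (S.map (· + c))))
      (PySem.Set.ofList [0]) with hsums
  set combination : PySem.Set Int :=
    (PySem.List.pyRange 1 ((coin_types.length : Int) + 1) 1).foldl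
      (fun s r => PySem.Set.update s ((PySem.List.combinations coin_types r.toNat).map List.sum))
      PySem.Set.empty with hcomb
  set L : List Int := PySem.List.sorted (sums.filter (fun x => decide (1 ≤ x))) (fun x => x) false
    with hL
  -- the two collections agree on values ≥ 1
  have hmem : ∀ x : Int, 1 ≤ x → (x ∈ combination ↔ x ∈ L) := by
    intro x hx
    rw [hcomb, pvMemA, hL, PySem.List.mem_sorted, List.mem_filter, hsums, pvMemB]
    constructor
    · rintro ⟨l, hsub, _, hsum⟩
      exact ⟨⟨0, by simp [PySem.Set.ofList], l, hsub, by omega⟩, by simpa using hx⟩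
    · rintro ⟨⟨s, hs, l, hsub, hsum⟩, _⟩
      have hs0 : s = 0 := by simpa [PySem.Set.ofList] using hs
      subst hs0
      refine ⟨l, hsub, ?_, by omega⟩
      rintro rfl
      simp at hsum
      omega
  -- L is strictly increasing with all elements ≥ 1
  have hLnodup : L.Nodup := by
    rw [hL]
    exact ((PySem.List.sorted_perm _ _ _).nodup_iff).mpr
      ((pvNodupB coin_types _ (PySem.Set.nodup_ofList _)).filter _)
  have hLle : L.Pairwise (· ≤ ·) := by
    simpa using PySem.List.sorted_pairwise (xs := sums.filter (fun x => decide (1 ≤ x)))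
      (key := fun x => x)
  have hLlt : L.Pairwise (· < ·) := by
    refine (hLle.and hLnodup).imp ?_
    rintro a b ⟨hab, hne⟩
    exact lt_of_le_of_ne hab hne
  have hLge : ∀ x ∈ L, (1 : Int) ≤ x := by
    intro x hx
    rw [hL, PySem.List.mem_sorted, List.mem_filter] at hx
    simpa using hx.2
  obtain ⟨a1, a2, a3⟩ := pvFindAbsent_spec
    (combination.countP (fun x => decide ((1:Int) ≤ x))) combination 1 le_rfl
  obtain ⟨b1, b2, b3⟩ := pvScanGap_spec L 1 hLlt hLge
  -- both are the least value ≥ 1 absent from the (agreeing) collections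
  rcases lt_trichotomy (pvFindAbsent combination 1) (pvScanGap L 1) with h | h | h
  · exact absurd ((hmem _ a2).mpr (b3 _ a2 h)) a1
  · exact h
  · exact absurd ((hmem _ b2).mp (a3 _ b2 h)) b1
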